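-- pv_equiv track=rewrite | github.com/Asunaro276/GANProject | data/data_loader.py | make_datapath_list
-- ===== SOURCE A (Python) =====
-- def make_datapath_list(label_list=None):
--     if label_list is None:
--         label_list = [1, 4]
--     train_img_list = []
--     train_label_list = []
--     for img_idx in range(200):
--         for i, label in enumerate(label_list):
--             img_path = f"./data/img_{label}/img_{label}_{img_idx}.png"
--             train_img_list.append(img_path)
--             train_label_list.append(i)
--
--     return train_img_list, train_label_list
-- ===== SOURCE B (Python) =====
-- def make_datapath_list(label_list=None):
--     if label_list is None:
--         label_list = [1, 4]
--     # column-major construction: one column of 200 paths per label, then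
--     # transpose (zip) to interleave labels per image index
--     cols = [[f"./data/img_{label}/img_{label}_{img_idx}.png"
--              for img_idx in range(200)]
--             for label in label_list]
--     train_img_list = [p for row in zip(*cols) for p in row]
--     label_cols = [[i] * 200 for i in range(len(label_list))]
--     train_label_list = [i for row in zip(*label_cols) for i in row]
--     return train_img_list, train_label_list
-- ===== Notes on version B (the rewrite author's own statement) =====
-- stated objective: alternative
-- what changed: B builds the data column-major (one 200-entry column per label, and [i]*200 label columns) and then transposes with zip(*cols) to recover A's interleaved row-major order, instead of A's fused nested loop appending into both lists row by row.
import Mathlib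
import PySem

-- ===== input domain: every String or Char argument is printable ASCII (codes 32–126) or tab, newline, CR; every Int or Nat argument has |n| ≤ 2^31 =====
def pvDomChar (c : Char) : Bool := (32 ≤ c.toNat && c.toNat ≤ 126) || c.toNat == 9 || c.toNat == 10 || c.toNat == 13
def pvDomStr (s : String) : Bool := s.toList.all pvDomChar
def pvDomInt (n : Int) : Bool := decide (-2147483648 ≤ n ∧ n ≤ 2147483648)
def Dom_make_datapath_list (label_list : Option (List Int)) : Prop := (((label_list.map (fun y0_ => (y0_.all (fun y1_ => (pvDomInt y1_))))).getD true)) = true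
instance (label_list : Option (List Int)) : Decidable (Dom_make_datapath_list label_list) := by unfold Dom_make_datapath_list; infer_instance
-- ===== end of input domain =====

-- B builds the data column-major (one path column per label, [i]*200 label columns) and
-- transposes with zip(*cols) to recover A's interleaved order; objective: alternative.

-- the f-string f"./data/img_{label}/img_{label}_{img_idx}.png" (shared by both Pythons verbatim)
def pvPath (label img_idx : Int) : String :=
  "./data/img_" ++ PySem.Int.toStr label ++ "/img_" ++ PySem.Int.toStr label ++ "_" ++
    PySem.Int.toStr img_idx ++ ".png"

-- ===== PORT A =====
-- the loop body of A, over the (defaulted) label list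
def pvLoopA (ll : List Int) : List String × List Int :=
  (PySem.List.pyRange 0 200 1).foldl
    (fun (st : List String × List Int) img_idx =>
      (PySem.List.enumerate ll 0).foldl
        (fun (st2 : List String × List Int) p =>
          (st2.1 ++ [pvPath p.2 img_idx], st2.2 ++ [p.1])) st)
    ([], [])

def make_datapath_list (label_list : Option (List Int)) : List String × List Int :=
  pvLoopA (label_list.getD [1, 4])

-- ===== PORT B =====
-- Python's zip(*cols): take the heads of all columns (none if any column is exhausted)
def pvHeads? {α : Type} : List (List α) → Option (List α × List (List α))
  | [] => some ([], [])
  | [] :: _ => none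
  | (h :: t) :: cs =>
    match pvHeads? cs with
    | none => none
    | some (hs, ts) => some (h :: hs, t :: ts)

-- zip(*cols) as rows: repeatedly strip one element off every column until one runs out;
-- zip of no iterables is empty
def pvZipT {α : Type} : List (List α) → List (List α)
  | [] => []
  | [] :: _ => []
  | (h :: t) :: cs =>
    match pvHeads? cs with
    | none => []
    | some (hs, ts) => (h :: hs) :: pvZipT (t :: ts)
termination_by cols => (cols.headD []).length
decreasing_by simp

def make_datapath_list_alt (label_list : Option (List Int)) : List String × List Int :=
  let ll := label_list.getD [1, 4]
  let cols := ll.map (fun label => (PySem.List.pyRange 0 200 1).map (fun i => pvPath label i))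
  let lcols := (PySem.List.pyRange 0 (ll.length : Int) 1).map (fun i => List.replicate 200 i)
  ((pvZipT cols).flatten, (pvZipT lcols).flatten)

-- ===== PRECONDITION & SPEC =====
def Spec_make_datapath_list (label_list : Option (List Int)) (out : List String × List Int) : Prop := out = make_datapath_list_alt label_list
instance (label_list : Option (List Int)) (out : List String × List Int) : Decidable (Spec_make_datapath_list label_list out) := by unfold Spec_make_datapath_list; infer_instance

-- ===== CLAIM (what is proved, stated in full; the proofs are below) =====
def Claim_equal_make_datapath_list : Prop := ∀ (label_list : Option (List Int)), Dom_make_datapath_list label_list → Spec_make_datapath_list label_list (make_datapath_list label_list)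

-- ===== LEMMAS AND PROOFS =====

-- A's inner loop over enumerate(ll) appends one path per label and the running indices.
theorem pv_inner (ll : List Int) (s idx : Int) (acc : List String × List Int) :
    (PySem.List.enumerate ll s).foldl
        (fun (st2 : List String × List Int) p =>
          (st2.1 ++ [pvPath p.2 idx], st2.2 ++ [p.1])) acc
      = (acc.1 ++ ll.map (fun l => pvPath l idx),
         acc.2 ++ PySem.List.pyRange s (s + ll.length) 1) := by
  induction ll generalizing s acc with
  | nil => simp [PySem.List.enumerate_nil, PySem.List.pyRange_one_eq_nil]
  | cons x xs ih =>
    have hlen : s + (((x :: xs).length : Nat) : Int) = (s + 1) + ((xs.length : Nat) : Int) := by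
      simp only [List.length_cons]; push_cast; ring
    rw [PySem.List.enumerate_cons, List.foldl_cons, ih, hlen,
        PySem.List.pyRange_one_cons (by omega : s < (s + 1) + ((xs.length : Nat) : Int))]
    simp

-- A's outer loop over any index list: flat interleaved paths plus repeated index blocks.
theorem pv_outer (ll : List Int) (xs : List Int) (acc : List String × List Int) :
    xs.foldl
      (fun (st : List String × List Int) img_idx =>
        (PySem.List.enumerate ll 0).foldl
          (fun (st2 : List String × List Int) p =>
            (st2.1 ++ [pvPath p.2 img_idx], st2.2 ++ [p.1])) st) acc
      = (acc.1 ++ xs.flatMap (fun img_idx => ll.map (fun label => pvPath label img_idx)),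
         acc.2 ++ (List.replicate xs.length (PySem.List.pyRange 0 (ll.length : Int) 1)).flatten) := by
  induction xs generalizing acc with
  | nil => simp
  | cons x t ih =>
    rw [List.foldl_cons, pv_inner, ih]
    simp [List.append_assoc, List.replicate_succ]

-- heads of uniformly-shaped nonempty columns
theorem pv_heads {α β γ : Type} (f : α → β → γ) (x : β) (t : List β) (ll : List α) :
    pvHeads? (ll.map fun l => f l x :: t.map (f l))
      = some (ll.map (fun l => f l x), ll.map (fun l => t.map (f l))) := by
  induction ll with
  | nil => simp [pvHeads?]
  | cons a as ih => simp [pvHeads?, ih]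

-- transposing the uniform column family recovers the row-major rows (nonempty family)
theorem pv_zipT {α β γ : Type} (f : α → β → γ) (l0 : α) (ll : List α) (xs : List β) :
    pvZipT ((l0 :: ll).map fun l => xs.map (f l))
      = xs.map (fun x => (l0 :: ll).map (fun l => f l x)) := by
  induction xs with
  | nil => simp only [List.map_nil, List.map_cons]; rw [pvZipT.eq_2]
  | cons x t ih =>
    simp only [List.map_cons]
    rw [pvZipT.eq_3, pv_heads f x t ll]
    have : pvZipT ((t.map (f l0)) :: ll.map fun l => t.map (f l))
        = t.map (fun x => (l0 :: ll).map (fun l => f l x)) := by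
      simpa [List.map_cons] using ih
    simp [this]

-- the two constructions coincide for every label list
theorem pv_img_side (l0 : Int) (ls xs : List Int) :
    (pvZipT ((l0 :: ls).map (fun label => xs.map (fun i => pvPath label i)))).flatten
      = xs.flatMap (fun img_idx => (l0 :: ls).map (fun label => pvPath label img_idx)) := by
  rw [pv_zipT (fun label i => pvPath label i) l0 ls xs, ← List.flatMap_def]

theorem pv_label_side (n : Nat) (l0 : Int) (r' : List Int) :
    pvZipT ((l0 :: r').map (fun i => List.replicate n i))
      = List.replicate n (l0 :: r') := by
  have h1 : ((l0 :: r').map (fun i => List.replicate n i))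
      = (l0 :: r').map (fun l => (List.replicate n (0 : Int)).map (fun _ => l)) := by
    simp only [List.map_replicate]
  rw [h1, pv_zipT (fun (i : Int) (_ : Int) => i) l0 r' (List.replicate n (0 : Int))]
  simp only [List.map_replicate, List.map_id']

theorem pv_main (ll : List Int) : pvLoopA ll
    = ((pvZipT (ll.map (fun label => (PySem.List.pyRange 0 200 1).map (fun i => pvPath label i)))).flatten,
       (pvZipT ((PySem.List.pyRange 0 (ll.length : Int) 1).map (fun i => List.replicate 200 i))).flatten) := by
  unfold pvLoopA
  rw [pv_outer]
  have hl : (PySem.List.pyRange 0 200 1).length = 200 := by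
    rw [PySem.List.length_pyRange_one]; decide
  rw [hl]
  cases ll with
  | nil =>
    have hfm : (PySem.List.pyRange 0 200 1).flatMap (fun _ => ([] : List String)) = [] := by
      induction PySem.List.pyRange 0 200 1 with
      | nil => rfl
      | cons a t ih => simp [ih]
    have hrep : (List.replicate 200 ([] : List Int)).flatten = [] := by
      induction (200 : Nat) with
      | zero => rfl
      | succ n ih => simp [List.replicate_succ, ih]
    simp only [List.length_nil, Nat.cast_zero,
      PySem.List.pyRange_one_eq_nil (le_refl (0 : Int)), List.map_nil]
    rw [pvZipT.eq_1, pvZipT.eq_1]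
    show (([] : List String) ++ (PySem.List.pyRange 0 200 1).flatMap (fun _ => ([] : List String)),
          ([] : List Int) ++ (List.replicate 200 ([] : List Int)).flatten) = ([], [])
    rw [hfm, hrep]
    rfl
  | cons l0 ls =>
    have hr : PySem.List.pyRange 0 (((l0 :: ls).length : Nat) : Int) 1
        = 0 :: PySem.List.pyRange 1 (((l0 :: ls).length : Nat) : Int) 1 := by
      rw [PySem.List.pyRange_one_cons (by exact_mod_cast Nat.succ_pos ls.length)]
      norm_num
    simp only [Prod.mk.injEq]
    refine ⟨?_, ?_⟩
    · rw [pv_img_side]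
      exact List.nil_append _
    · rw [hr, pv_label_side 200 0 (PySem.List.pyRange 1 (((l0 :: ls).length : Nat) : Int) 1), ← hr]
      exact List.nil_append _

-- ===== VERDICT (by name: the statement is the Claim_ definition above) =====
theorem make_datapath_list_spec : Claim_equal_make_datapath_list := by
  intro label_list _
  unfold Spec_make_datapath_list make_datapath_list make_datapath_list_alt
  exact pv_main _
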